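-- pv_equiv track=rewrite | github.com/danielechiarion/eserciziario_Python_5E | ripasso/Chiarion_5E_Es2A_stringhe.py | compareVowels
-- ===== SOURCE A (Python) =====
-- def compareVowels(firstString, secondString):
--     firstCount = 0
--     secondCount = 0
--     vowels = "aeiouAEIOU" # make a string with the vowels
--
--     # use a single cycle to check the two strings
--     for i in range(max(len(firstString), len(secondString))):
--         if i < len(firstString) and vowels.__contains__(firstString[i]):
--             firstCount += 1
--         if i < len(secondString) and vowels.__contains__(secondString[i]):
--             secondCount += 1
--
--     if firstCount > secondCount:
--         return 1
--     elif firstCount < secondCount: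
--         return 2
--     else:
--         return 0
-- ===== SOURCE B (Python) =====
-- def char_freq(s):
--     freq = {}
--     for ch in s:
--         freq[ch] = freq.get(ch, 0) + 1
--     return freq
--
-- def compareVowels(firstString, secondString):
--     freq1 = char_freq(firstString)
--     freq2 = char_freq(secondString)
--     diff = 0
--     for v in "aeiouAEIOU":
--         diff += freq1.get(v, 0) - freq2.get(v, 0)
--     if diff > 0:
--         return 1
--     elif diff < 0:
--         return 2
--     else:
--         return 0
-- ===== Notes on version B (the rewrite author's own statement) =====
-- stated objective: alternative
-- what changed: Instead of scanning indices and testing every character against the 10-char vowel string, B builds a character-frequency dictionary per string once, then sums the signed per-vowel frequency difference over the ten vowels and returns its sign as 1/2/0.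
import Mathlib
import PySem

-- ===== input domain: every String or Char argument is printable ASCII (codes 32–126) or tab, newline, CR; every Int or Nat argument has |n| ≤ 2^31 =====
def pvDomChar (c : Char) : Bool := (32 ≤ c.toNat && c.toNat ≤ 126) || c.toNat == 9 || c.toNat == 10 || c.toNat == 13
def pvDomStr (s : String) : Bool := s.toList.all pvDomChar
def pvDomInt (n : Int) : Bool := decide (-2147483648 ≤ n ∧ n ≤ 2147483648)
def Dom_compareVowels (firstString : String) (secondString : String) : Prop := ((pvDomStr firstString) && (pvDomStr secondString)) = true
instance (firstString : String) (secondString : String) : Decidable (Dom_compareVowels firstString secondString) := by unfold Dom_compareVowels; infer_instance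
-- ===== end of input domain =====

-- B builds a character-frequency dictionary per string and sums the signed per-vowel
-- frequency differences, instead of A's merged index loop with per-index membership
-- tests and two counters; objective: alternative. Fully equivalent.

-- ===== PORT A =====
-- single loop over range(max(len,len)) with two guarded counters, as in A
def compareVowels (firstString : String) (secondString : String) : Int :=
  let vowels := "aeiouAEIOU".toList
  let fl := firstString.toList
  let sl := secondString.toList
  let st := (List.range (max fl.length sl.length)).foldl
    (fun (st : Int × Int) i =>
      (if decide (i < fl.length) && vowels.contains (fl.getD i ' ') then st.1 + 1 else st.1,
       if decide (i < sl.length) && vowels.contains (sl.getD i ' ') then st.2 + 1 else st.2))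
    (0, 0)
  if st.1 > st.2 then 1 else if st.1 < st.2 then 2 else 0

-- ===== PORT B =====
-- helper char_freq: frequency dictionary 'freq[ch] = freq.get(ch, 0) + 1'
def charFreq (s : String) : PySem.Dict Char Int :=
  s.toList.foldl (fun d ch => d.insert ch (d.getD ch 0 + 1)) PySem.Dict.empty

def compareVowels_alt (firstString : String) (secondString : String) : Int :=
  let freq1 := charFreq firstString
  let freq2 := charFreq secondString
  let diff := "aeiouAEIOU".toList.foldl
    (fun (diff : Int) v => diff + (freq1.getD v 0 - freq2.getD v 0)) 0
  if diff > 0 then 1 else if diff < 0 then 2 else 0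

-- ===== PRECONDITION & SPEC =====
def Spec_compareVowels (firstString : String) (secondString : String) (out : Int) : Prop := out = compareVowels_alt firstString secondString
instance (firstString : String) (secondString : String) (out : Int) : Decidable (Spec_compareVowels firstString secondString out) := by unfold Spec_compareVowels; infer_instance

-- ===== CLAIM (what is proved, stated in full; the proofs are below) =====
def Claim_equal_compareVowels : Prop := ∀ (firstString : String) (secondString : String), Dom_compareVowels firstString secondString → Spec_compareVowels firstString secondString (compareVowels firstString secondString)

-- ===== LEMMAS AND PROOFS =====

-- a counting foldl over Int is the countP, shifted by the start value
theorem pv_foldl_count (p : Nat → Bool) (l : List Nat) (a : Int) :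
    l.foldl (fun c i => if p i then c + 1 else c) a = a + (l.countP p : Nat) := by
  induction l generalizing a with
  | nil => simp
  | cons x xs ih =>
    simp only [List.foldl, List.countP_cons, ih]
    by_cases h : p x <;> simp [h] <;> push_cast <;> ring

-- counting guarded hits over range n (n ≥ length) is counting over the list itself
theorem pv_countP_range (P : Char → Bool) (d : Char) (l : List Char) :
    ∀ n, l.length ≤ n →
      (List.range n).countP (fun i => decide (i < l.length) && P (l.getD i d)) = l.countP P := by
  induction l with
  | nil => intro n _; simp
  | cons a l ih =>
    intro n hn
    have hn' : l.length + 1 ≤ n := by simpa using hn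
    obtain ⟨m, rfl⟩ : ∃ m, n = m + 1 := ⟨n - 1, by omega⟩
    rw [List.range_succ_eq_map]
    simp only [List.countP_cons, List.countP_map]
    have h1 : ((a :: l).getD 0 d) = a := rfl
    have h2 : (fun i => decide (Nat.succ i < (a :: l).length) && P ((a :: l).getD (Nat.succ i) d))
        = fun i => decide (i < l.length) && P (l.getD i d) := by
      funext i; simp [List.getD]
    rw [show ((fun i => decide (i < (a :: l).length) && P ((a :: l).getD i d)) ∘ Nat.succ)
        = fun i => decide (Nat.succ i < (a :: l).length) && P ((a :: l).getD (Nat.succ i) d) from rfl,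
      h2, ih m (by omega)]
    simp [h1, Nat.add_comm]

-- A's loop computes exactly the two vowel counts (as countP over the vowel string)
theorem pv_loop_eq (f s : String) :
    ((List.range (max f.toList.length s.toList.length)).foldl
      (fun (st : Int × Int) i =>
        (if decide (i < f.toList.length) && ("aeiouAEIOU".toList.contains (f.toList.getD i ' ')) then st.1 + 1 else st.1,
         if decide (i < s.toList.length) && ("aeiouAEIOU".toList.contains (s.toList.getD i ' ')) then st.2 + 1 else st.2))
      ((0 : Int), (0 : Int)))
    = (((f.toList.countP (fun ch => "aeiouAEIOU".toList.contains ch) : Nat) : Int),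
       ((s.toList.countP (fun ch => "aeiouAEIOU".toList.contains ch) : Nat) : Int)) := by
  rw [PySem.List.foldl_prod_mk
    (f := fun (c : Int) i => if decide (i < f.toList.length) && ("aeiouAEIOU".toList.contains (f.toList.getD i ' ')) then c + 1 else c)
    (g := fun (c : Int) i => if decide (i < s.toList.length) && ("aeiouAEIOU".toList.contains (s.toList.getD i ' ')) then c + 1 else c)]
  rw [pv_foldl_count, pv_foldl_count,
    pv_countP_range _ ' ' f.toList _ (Nat.le_max_left _ _),
    pv_countP_range _ ' ' s.toList _ (Nat.le_max_right _ _)]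
  simp only [Prod.mk.injEq, zero_add]

-- disjoint-or splits a countP into a count plus a countP
theorem pv_countP_or (v : Char) (p : Char → Bool) (h : p v = false) (l : List Char) :
    l.countP (fun ch => ch == v || p ch) = l.count v + l.countP p := by
  induction l with
  | nil => simp
  | cons a l ih =>
    by_cases ha : a = v
    · subst ha; simp [List.countP_cons, List.count_cons, h, ih, Nat.add_right_comm]
    · simp only [List.countP_cons, List.count_cons, ih, beq_iff_eq, ha, if_false]
      by_cases hp : p a <;> simp [hp, ha] <;> omega

-- per-vowel counts summed over a duplicate-free vowel list are the vowel countP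
theorem pv_sum_counts (vs : List Char) (hv : vs.Nodup) (l : List Char) :
    (vs.map (fun v => (l.count v : Int))).sum = (l.countP (fun ch => vs.contains ch) : Nat) := by
  induction vs with
  | nil => simp
  | cons v vs ih =>
    have hnv : vs.contains v = false := by
      simp only [List.Nodup] at hv
      simp [List.contains_iff_mem]
      exact (List.nodup_cons.mp hv).1
    have : (fun ch => (v :: vs).contains ch) = fun ch => ch == v || vs.contains ch := by
      funext ch
      by_cases hc : ch = v
      · simp [hc]
      · simp [hc, Ne.symm hc]
    rw [this]
    rw [pv_countP_or v _ hnv l]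
    simp only [List.map_cons, List.sum_cons, ih (List.nodup_cons.mp hv).2]
    push_cast; ring

-- B's vowel fold is the signed difference of the two vowel counts
theorem pv_diff_fold (vs : List Char) (c1 c2 : Char → Int) (a : Int) :
    vs.foldl (fun (d : Int) v => d + (c1 v - c2 v)) a
      = a + (vs.map c1).sum - (vs.map c2).sum := by
  induction vs generalizing a with
  | nil => simp
  | cons v vs ih => simp [List.foldl, ih]; ring

-- charFreq lookups are character counts
theorem pv_charFreq_getD (s : String) (v : Char) :
    (charFreq s).getD v 0 = (s.toList.count v : Nat) := by
  unfold charFreq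
  rw [PySem.Dict.getD_foldl_insert_add_one]
  simp

-- ===== VERDICT (by name: the statement is the Claim_ definition above) =====
theorem compareVowels_spec : Claim_equal_compareVowels := by
  intro f s _
  show compareVowels f s = compareVowels_alt f s
  simp only [compareVowels, compareVowels_alt]
  rw [pv_loop_eq f s]
  have hget : ∀ t : String, ∀ v : Char, (charFreq t).getD v 0 = (t.toList.count v : Nat) :=
    fun t v => pv_charFreq_getD t v
  rw [pv_diff_fold "aeiouAEIOU".toList (fun v => (charFreq f).getD v 0) (fun v => (charFreq s).getD v 0)]
  have h1 : ("aeiouAEIOU".toList.map (fun v => (charFreq f).getD v 0)).sum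
      = (f.toList.countP (fun ch => "aeiouAEIOU".toList.contains ch) : Nat) := by
    rw [show (fun v => (charFreq f).getD v 0) = fun v => ((f.toList.count v : Nat) : Int) from funext (hget f)]
    exact pv_sum_counts _ (by decide) _
  have h2 : ("aeiouAEIOU".toList.map (fun v => (charFreq s).getD v 0)).sum
      = (s.toList.countP (fun ch => "aeiouAEIOU".toList.contains ch) : Nat) := by
    rw [show (fun v => (charFreq s).getD v 0) = fun v => ((s.toList.count v : Nat) : Int) from funext (hget s)]
    exact pv_sum_counts _ (by decide) _
  rw [h1, h2]
  split_ifs <;> omega
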